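-- pv_equiv track=rewrite | github.com/Tamura3480/Characteristic-polynomial-data | check_the_Postnikov_Stanley_Linial_arrangement_conjecture.py | count_change_of_sign
-- ===== SOURCE A (Python) =====
-- from typing import List
--
-- def differentiate_polynomial(polynomial :List[int]) -> List[int]:
--     d=len(polynomial)
--     new_polynomial=[0]*(d-1)
--     for i in range(d-1):
--         new_polynomial[i]=(i+1)*polynomial[i+1]
--     return new_polynomial
--
-- def calc_value(polynomial :List[int] ,point :int) -> int:
--     value=0
--     d=len(polynomial)
--     for i in range(d):
--         value+=polynomial[i]*(point**(i))
--     return value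
--
-- def count_change_of_sign(polynomial :List[int] ,start_point :int ,end_point :int) -> int:
--     d=len(polynomial)
--     new_polynomial=polynomial[:]#list deep_copy
--     start_value1=calc_value(new_polynomial,start_point)
--     end_value1=calc_value(new_polynomial,end_point)
--     if start_value1*end_value1!=0:
--         start_count=0
--         end_count=0
--         for i in range(d-1):
--             new_polynomial=differentiate_polynomial(new_polynomial)
--             start_value2=calc_value(new_polynomial,start_point)
--             end_value2=calc_value(new_polynomial,end_point)
--             if start_value2!=0:
--                 if start_value1*start_value2<0:
--                     start_count+=1
--                 start_value1=start_value2
--             if end_value2!=0: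
--                 if end_value1*end_value2<0:
--                     end_count+=1
--                 end_value1=end_value2
--     else:
--         start_count=1 if start_value1==0 else 0
--         end_count=0
--     return start_count-end_count
-- ===== SOURCE B (Python) =====
-- from typing import List
--
-- def count_change_of_sign(polynomial: List[int], start_point: int, end_point: int) -> int:
--     # Taylor shift by repeated synthetic division: dividing repeatedly by (t - x)
--     # yields b_k = p^(k)(x)/k!, whose signs equal the signs of the derivative
--     # values, so we count sign changes on the shifted coefficients directly --
--     # no derivative chain and no re-evaluation of each derivative.
--     def taylor(coeffs, x):
--         b = []
--         q = coeffs
--         while q: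
--             vs = []
--             r = 0
--             for c in reversed(q):
--                 r = r * x + c
--                 vs.append(r)
--             b.append(r)            # remainder = value of current q at x
--             q = vs[:-1][::-1]      # quotient of q by (t - x), ascending
--         return b
--
--     bs = taylor(polynomial, start_point)
--     be = taylor(polynomial, end_point)
--     s0 = bs[0] if bs else 0
--     e0 = be[0] if be else 0
--     if s0 * e0 == 0:
--         return 1 if s0 == 0 else 0
--
--     def sign_changes(vals):
--         signs = [1 if v > 0 else -1 for v in vals if v != 0]
--         return sum(1 for a, b2 in zip(signs, signs[1:]) if a != b2)
--
--     return sign_changes(bs) - sign_changes(be)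
-- ===== Notes on version B (the rewrite author's own statement) =====
-- stated objective: faster
-- what changed: B never builds the derivative chain or evaluates any derivative: it Taylor-shifts the polynomial to each point by repeated synthetic division by (t - x), whose coefficients b_k = p^(k)(x)/k! have the same signs as the derivative values, and counts sign changes over those coefficient lists.
import Mathlib
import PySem

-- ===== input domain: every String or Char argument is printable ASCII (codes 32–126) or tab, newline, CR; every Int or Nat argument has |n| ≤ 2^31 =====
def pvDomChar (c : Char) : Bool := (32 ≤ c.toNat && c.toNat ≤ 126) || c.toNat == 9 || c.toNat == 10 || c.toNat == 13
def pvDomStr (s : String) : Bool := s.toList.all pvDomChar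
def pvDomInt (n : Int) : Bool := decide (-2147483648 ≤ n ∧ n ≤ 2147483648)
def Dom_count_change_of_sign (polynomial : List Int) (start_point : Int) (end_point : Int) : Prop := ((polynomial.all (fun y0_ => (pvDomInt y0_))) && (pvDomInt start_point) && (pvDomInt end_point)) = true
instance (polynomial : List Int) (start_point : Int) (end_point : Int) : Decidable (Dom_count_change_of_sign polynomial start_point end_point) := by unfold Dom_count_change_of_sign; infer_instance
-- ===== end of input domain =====

-- B replaces A's derivative chain by a Taylor shift (repeated synthetic division by
-- (t - x)), whose coefficients carry the signs of the derivative values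
-- (objective: faster, measured).

-- ===== PORT A =====
-- differentiate_polynomial: new list of length d-1 with entry i = (i+1)*p[i+1]
def pvDiffPoly (p : List Int) : List Int :=
  (List.range (p.length - 1)).map (fun i => (((i : Nat) + 1 : Nat) : Int) * p.getD (i + 1) 0)

-- calc_value: sum over i in range(d) of p[i] * point**i
def pvCalcValue (p : List Int) (point : Int) : Int :=
  (List.range p.length).foldl (fun value i => value + p.getD i 0 * point ^ i) 0

-- the body of A's for-loop (the index i is unused by the body)
def pvLoopBody (start_point end_point : Int)
    (s : List Int × Int × Int × Int × Int) (_i : Nat) : List Int × Int × Int × Int × Int :=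
  let np := pvDiffPoly s.1
  let sv2 := pvCalcValue np start_point
  let ev2 := pvCalcValue np end_point
  let sv1 := s.2.1
  let ev1 := s.2.2.1
  let sc := s.2.2.2.1
  let ec := s.2.2.2.2
  let scsv : Int × Int := if sv2 ≠ 0 then (if sv1 * sv2 < 0 then sc + 1 else sc, sv2) else (sc, sv1)
  let ecev : Int × Int := if ev2 ≠ 0 then (if ev1 * ev2 < 0 then ec + 1 else ec, ev2) else (ec, ev1)
  (np, scsv.2, ecev.2, scsv.1, ecev.1)

def count_change_of_sign (polynomial : List Int) (start_point : Int) (end_point : Int) : Int :=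
  let d := polynomial.length
  let np := polynomial
  let sv1 := pvCalcValue np start_point
  let ev1 := pvCalcValue np end_point
  if sv1 * ev1 ≠ 0 then
    -- loop state: (new_polynomial, start_value1, end_value1, start_count, end_count)
    let st := (List.range (d - 1)).foldl (pvLoopBody start_point end_point) (np, sv1, ev1, 0, 0)
    st.2.2.2.1 - st.2.2.2.2
  else
    (if sv1 = 0 then (1 : Int) else 0) - 0

-- ===== PORT B =====
-- the inner for-loop of taylor: r, vs accumulated over reversed(q)
def pvDivide (x : Int) (q : List Int) : Int × List Int :=
  q.reverse.foldl (fun (s : Int × List Int) c => (s.1 * x + c, s.2 ++ [s.1 * x + c])) (0, [])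

-- length fact needed by taylorShift's termination
theorem pvDivide_aux_len (x : Int) (l : List Int) (r : Int) (acc : List Int) :
    ((l.foldl (fun (s : Int × List Int) c => (s.1 * x + c, s.2 ++ [s.1 * x + c])) (r, acc)).2).length
      = acc.length + l.length := by
  induction l generalizing r acc with
  | nil => simp
  | cons a t ih => simp [List.foldl_cons, ih]; omega

theorem pvDivide_snd_length (x : Int) (q : List Int) : (pvDivide x q).2.length = q.length := by
  unfold pvDivide; rw [pvDivide_aux_len]; simp

-- the while loop: append the remainder, continue with the quotient vs[:-1][::-1]
def taylorShift (x : Int) : List Int → List Int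
  | [] => []
  | c :: t =>
    let rvs := pvDivide x (c :: t)
    rvs.1 :: taylorShift x rvs.2.dropLast.reverse
  termination_by l => l.length
  decreasing_by
    simp only [List.length_reverse, List.length_dropLast, pvDivide_snd_length]
    simp

-- [1 if v > 0 else -1 for v in vals if v != 0]
def pvSignsList (vals : List Int) : List Int :=
  (vals.filter (fun v => v != 0)).map (fun v => if v > 0 then (1 : Int) else -1)

-- sum(1 for a, b2 in zip(signs, signs[1:]) if a != b2)
def pvPairCount (signs : List Int) : Int :=
  (signs.zip (signs.drop 1)).foldl (fun c ab => if ab.1 ≠ ab.2 then c + 1 else c) 0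

def count_change_of_sign_alt (polynomial : List Int) (start_point : Int) (end_point : Int) : Int :=
  let bs := taylorShift start_point polynomial
  let be := taylorShift end_point polynomial
  let s0 := bs.getD 0 0
  let e0 := be.getD 0 0
  if s0 * e0 = 0 then (if s0 = 0 then 1 else 0)
  else pvPairCount (pvSignsList bs) - pvPairCount (pvSignsList be)

-- ===== PRECONDITION & SPEC =====
def Spec_count_change_of_sign (polynomial : List Int) (start_point : Int) (end_point : Int) (out : Int) : Prop := out = count_change_of_sign_alt polynomial start_point end_point
instance (polynomial : List Int) (start_point : Int) (end_point : Int) (out : Int) : Decidable (Spec_count_change_of_sign polynomial start_point end_point out) := by unfold Spec_count_change_of_sign; infer_instance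

-- ===== CLAIM (what is proved, stated in full; the proofs are below) =====
def Claim_equal_count_change_of_sign : Prop := ∀ (polynomial : List Int) (start_point : Int) (end_point : Int), Dom_count_change_of_sign polynomial start_point end_point → Spec_count_change_of_sign polynomial start_point end_point (count_change_of_sign polynomial start_point end_point)

-- ===== LEMMAS AND PROOFS =====

-- reference evaluation: evalSpec (c :: t) x = c + x * evalSpec t x
def evalSpec : List Int → Int → Int
  | [], _ => 0
  | c :: t, x => c + x * evalSpec t x

theorem pvFoldlCongr {α β : Type} (l : List α) (f g : β → α → β) (b : β)
    (h : ∀ s x, f s x = g s x) : l.foldl f b = l.foldl g b := by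
  induction l generalizing b with
  | nil => rfl
  | cons a t ih => simp only [List.foldl_cons, h, ih]

theorem calc_aux (t : List Int) (x a g : Int) :
    (List.range t.length).foldl (fun v i => v + t.getD i 0 * x ^ i * g) a
      = a + g * evalSpec t x := by
  induction t generalizing a g with
  | nil => simp [evalSpec]
  | cons c t ih =>
    rw [List.length_cons, List.range_succ_eq_map, List.foldl_cons, List.foldl_map]
    have h : ∀ (v : Int) (i : Nat),
        v + (c :: t).getD (i + 1) 0 * x ^ (i + 1) * g = v + t.getD i 0 * x ^ i * (x * g) := by
      intro v i; simp [pow_succ]; ring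
    calc (List.range t.length).foldl
            (fun v i => v + (c :: t).getD (i + 1) 0 * x ^ (i + 1) * g)
            (a + (c :: t).getD 0 0 * x ^ 0 * g)
        = (List.range t.length).foldl (fun v i => v + t.getD i 0 * x ^ i * (x * g))
            (a + (c :: t).getD 0 0 * x ^ 0 * g) := by
          exact pvFoldlCongr _ _ _ _ h
      _ = a + g * evalSpec (c :: t) x := by
          rw [ih]; simp [evalSpec]; ring

theorem pvCalcValue_eq_evalSpec (p : List Int) (x : Int) :
    pvCalcValue p x = evalSpec p x := by
  have h := calc_aux p x 0 1
  simp only [mul_one, one_mul, zero_add] at h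
  unfold pvCalcValue
  rw [← h]

-- the fold step of port A (with values rewritten through evalSpec)
def stepA (sp ep : Int) (s : List Int × Int × Int × Int × Int) : List Int × Int × Int × Int × Int :=
  let np := pvDiffPoly s.1
  let sv2 := evalSpec np sp
  let ev2 := evalSpec np ep
  let scsv : Int × Int := if sv2 ≠ 0 then (if s.2.1 * sv2 < 0 then s.2.2.2.1 + 1 else s.2.2.2.1, sv2) else (s.2.2.2.1, s.2.1)
  let ecev : Int × Int := if ev2 ≠ 0 then (if s.2.2.1 * ev2 < 0 then s.2.2.2.2 + 1 else s.2.2.2.2, ev2) else (s.2.2.2.2, s.2.2.1)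
  (np, scsv.2, ecev.2, scsv.1, ecev.1)

-- the fold step of the sign-change counter
def stepC (s : Int × Int) (v : Int) : Int × Int :=
  if v ≠ 0 then (if s.2 * v < 0 then s.1 + 1 else s.1, v) else s

-- value sequence of the first n derivatives (excluding p itself)
def tailVals (p : List Int) (x : Int) : Nat → List Int
  | 0 => []
  | n + 1 => evalSpec (pvDiffPoly p) x :: tailVals (pvDiffPoly p) x n

theorem foldl_const_iterate {σ : Type} (f : σ → σ) (l : List Nat) (init : σ) :
    l.foldl (fun s _ => f s) init = f^[l.length] init := by
  induction l generalizing init with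
  | nil => rfl
  | cons a t ih => simp [List.foldl_cons, ih, Function.iterate_succ_apply]

theorem stepA_iterate (sp ep : Int) (n : Nat) (q : List Int) (sv ev sc ec : Int) :
    (stepA sp ep)^[n] (q, sv, ev, sc, ec) =
      ((fun p => pvDiffPoly p)^[n] q,
       ((tailVals q sp n).foldl stepC (sc, sv)).2,
       ((tailVals q ep n).foldl stepC (ec, ev)).2,
       ((tailVals q sp n).foldl stepC (sc, sv)).1,
       ((tailVals q ep n).foldl stepC (ec, ev)).1) := by
  induction n generalizing q sv ev sc ec with
  | zero => simp [tailVals]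
  | succ n ih =>
    rw [Function.iterate_succ_apply, Function.iterate_succ_apply]
    have hstep : stepA sp ep (q, sv, ev, sc, ec) =
        (pvDiffPoly q,
         (stepC (sc, sv) (evalSpec (pvDiffPoly q) sp)).2,
         (stepC (ec, ev) (evalSpec (pvDiffPoly q) ep)).2,
         (stepC (sc, sv) (evalSpec (pvDiffPoly q) sp)).1,
         (stepC (ec, ev) (evalSpec (pvDiffPoly q) ep)).1) := by
      simp only [stepA, stepC]
    rw [hstep, ih]
    simp [tailVals, List.foldl_cons]

-- value sequence of p and its first n-1 derivatives
def seqVals (p : List Int) (x : Int) : Nat → List Int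
  | 0 => []
  | n + 1 => evalSpec p x :: seqVals (pvDiffPoly p) x n

theorem seqVals_diffPoly (p : List Int) (x : Int) (n : Nat) :
    seqVals (pvDiffPoly p) x n = tailVals p x n := by
  induction n generalizing p with
  | zero => rfl
  | succ n ih => simp [seqVals, tailVals, ih]

theorem pvLoopBody_eq_stepA (sp ep : Int) (s : List Int × Int × Int × Int × Int) (i : Nat) :
    pvLoopBody sp ep s i = stepA sp ep s := by
  simp only [pvLoopBody, stepA, pvCalcValue_eq_evalSpec]

theorem pvLoopBody_iterate (sp ep : Int) (n : Nat) (init : List Int × Int × Int × Int × Int) :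
    (List.range n).foldl (pvLoopBody sp ep) init = (stepA sp ep)^[n] init := by
  rw [pvFoldlCongr (List.range n) _ (fun s (_ : Nat) => stepA sp ep s) init
        (fun s i => pvLoopBody_eq_stepA sp ep s i),
    foldl_const_iterate (stepA sp ep), List.length_range]

-- ---------- B-side: pvDivide / taylorShift structure ----------

theorem pvDivide_cons (x c : Int) (t : List Int) :
    pvDivide x (c :: t) =
      ((pvDivide x t).1 * x + c, (pvDivide x t).2 ++ [(pvDivide x t).1 * x + c]) := by
  unfold pvDivide
  rw [List.reverse_cons, List.foldl_append]
  rfl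

theorem pvDivide_fst (x : Int) (q : List Int) : (pvDivide x q).1 = evalSpec q x := by
  induction q with
  | nil => rfl
  | cons c t ih => rw [pvDivide_cons]; simp [evalSpec, ih]; ring

-- the quotient list extracted by taylorShift's loop
def pvQuot (x : Int) (t : List Int) : List Int := (pvDivide x t).2.reverse

theorem pvQuot_nil (x : Int) : pvQuot x [] = [] := rfl

theorem pvQuot_cons (x c : Int) (t : List Int) :
    pvQuot x (c :: t) = evalSpec (c :: t) x :: pvQuot x t := by
  unfold pvQuot
  rw [pvDivide_cons, List.reverse_append]
  simp [pvDivide_fst, evalSpec]; ring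

theorem pvQuot_length (x : Int) (t : List Int) : (pvQuot x t).length = t.length := by
  simp [pvQuot, pvDivide_snd_length]

theorem taylorShift_nil (x : Int) : taylorShift x [] = [] := by rw [taylorShift]

theorem taylorShift_cons (x c : Int) (t : List Int) :
    taylorShift x (c :: t) = evalSpec (c :: t) x :: taylorShift x (pvQuot x t) := by
  rw [taylorShift]
  have h2 : (pvDivide x (c :: t)).2.dropLast.reverse = pvQuot x t := by
    rw [pvDivide_cons]; simp [pvQuot]
  rw [h2, pvDivide_cons]
  simp [pvDivide_fst, evalSpec]; ring_nf

theorem taylorShift_length (x : Int) (p : List Int) : (taylorShift x p).length = p.length := by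
  induction hn : p.length generalizing p with
  | zero =>
    have hnil : p = [] := List.length_eq_zero_iff.mp hn
    subst hnil
    rw [taylorShift_nil]
    rfl
  | succ n ih =>
    obtain ⟨c, t, rfl⟩ := List.exists_cons_of_length_eq_add_one hn
    have ht : t.length = n := by simpa using hn
    have h2 : (pvQuot x t).length = n := by rw [pvQuot_length]; exact ht
    rw [taylorShift_cons, List.length_cons, ih (pvQuot x t) h2]

-- ---------- polynomial algebra: taylorShift is the Taylor shift ----------

noncomputable def toPoly (l : List Int) : Polynomial Int :=
  l.foldr (fun c q => Polynomial.C c + Polynomial.X * q) 0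

theorem toPoly_nil : toPoly [] = 0 := rfl

theorem toPoly_cons (c : Int) (t : List Int) :
    toPoly (c :: t) = Polynomial.C c + Polynomial.X * toPoly t := rfl

theorem toPoly_coeff (l : List Int) (n : Nat) : (toPoly l).coeff n = l.getD n 0 := by
  induction l generalizing n with
  | nil => simp [toPoly]
  | cons c t ih =>
    cases n with
    | zero => simp [toPoly_cons]
    | succ n =>
      rw [toPoly_cons, Polynomial.coeff_add, Polynomial.coeff_X_mul, ih,
        Polynomial.coeff_C]
      simp

theorem toPoly_inj_len {l1 l2 : List Int} (hlen : l1.length = l2.length)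
    (h : toPoly l1 = toPoly l2) : l1 = l2 := by
  apply List.ext_getElem hlen
  intro i h1 h2
  have hc := congrArg (fun q => Polynomial.coeff q i) h
  simp only [toPoly_coeff] at hc
  rw [List.getD_eq_getElem l1 0 h1, List.getD_eq_getElem l2 0 h2] at hc
  exact hc

theorem div_identity (x : Int) (c : Int) (t : List Int) :
    toPoly (c :: t) =
      (Polynomial.X - Polynomial.C x) * toPoly (pvQuot x t)
        + Polynomial.C (evalSpec (c :: t) x) := by
  induction t generalizing c with
  | nil => simp [toPoly_cons, toPoly_nil, pvQuot_nil, evalSpec]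
  | cons c' t' ih =>
    rw [toPoly_cons, ih c', pvQuot_cons, toPoly_cons]
    have he : evalSpec (c :: c' :: t') x = c + x * evalSpec (c' :: t') x := rfl
    rw [he]
    simp only [map_add, map_mul]
    ring

theorem toPoly_taylor_aux (x : Int) (n : Nat) :
    ∀ (p : List Int), p.length ≤ n →
      toPoly p = (toPoly (taylorShift x p)).comp (Polynomial.X - Polynomial.C x) := by
  induction n with
  | zero =>
    intro p hp
    rw [List.length_eq_zero_iff.mp (Nat.le_zero.mp hp)]
    simp [taylorShift_nil, toPoly_nil]
  | succ n ih =>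
    intro p hp
    cases p with
    | nil => simp [taylorShift_nil, toPoly_nil]
    | cons c t =>
      have hle : (pvQuot x t).length ≤ n := by
        rw [pvQuot_length]; simp only [List.length_cons] at hp; omega
      rw [taylorShift_cons,
        show toPoly (evalSpec (c :: t) x :: taylorShift x (pvQuot x t))
            = Polynomial.C (evalSpec (c :: t) x)
              + Polynomial.X * toPoly (taylorShift x (pvQuot x t)) from rfl,
        Polynomial.add_comp, Polynomial.C_comp, Polynomial.mul_comp, Polynomial.X_comp,
        ← ih (pvQuot x t) hle, div_identity x c t]
      ring

theorem toPoly_taylorShift (x : Int) (p : List Int) :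
    toPoly p = (toPoly (taylorShift x p)).comp (Polynomial.X - Polynomial.C x) :=
  toPoly_taylor_aux x p.length p le_rfl

theorem comp_linear_inj (x : Int) {f g : Polynomial Int}
    (h : f.comp (Polynomial.X - Polynomial.C x) = g.comp (Polynomial.X - Polynomial.C x)) :
    f = g := by
  have h2 := congrArg (fun q => q.comp (Polynomial.X + Polynomial.C x)) h
  simpa [Polynomial.comp_assoc, Polynomial.sub_comp, Polynomial.add_comp,
    Polynomial.X_comp, Polynomial.C_comp] using h2

theorem diffPoly_getD (l : List Int) (n : Nat) :
    (pvDiffPoly l).getD n 0 = ((n : Int) + 1) * l.getD (n + 1) 0 := by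
  by_cases h : n < l.length - 1
  · have hlen : n < (pvDiffPoly l).length := by simpa [pvDiffPoly] using h
    rw [List.getD_eq_getElem _ _ hlen]
    simp [pvDiffPoly]
  · have h1 : (pvDiffPoly l).length ≤ n := by simpa [pvDiffPoly] using Nat.le_of_not_lt h
    have h2 : l.length ≤ n + 1 := by
      have : l.length - 1 ≤ n := by simpa [pvDiffPoly] using h1
      omega
    rw [List.getD_eq_default _ _ h1, List.getD_eq_default _ _ h2]
    ring

theorem diffPoly_length (l : List Int) : (pvDiffPoly l).length = l.length - 1 := by
  simp [pvDiffPoly]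

theorem toPoly_diffPoly (l : List Int) :
    toPoly (pvDiffPoly l) = Polynomial.derivative (toPoly l) := by
  apply Polynomial.ext
  intro n
  rw [toPoly_coeff, Polynomial.coeff_derivative, toPoly_coeff, diffPoly_getD]
  ring

theorem taylor_diff_comm (x : Int) (p : List Int) :
    taylorShift x (pvDiffPoly p) = pvDiffPoly (taylorShift x p) := by
  apply toPoly_inj_len
  · rw [taylorShift_length, diffPoly_length, diffPoly_length, taylorShift_length]
  · apply comp_linear_inj x
    rw [← toPoly_taylorShift, toPoly_diffPoly, toPoly_diffPoly, toPoly_taylorShift x p,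
      Polynomial.derivative_comp]
    simp

theorem taylor_iter_comm (x : Int) (k : Nat) (p : List Int) :
    taylorShift x (pvDiffPoly^[k] p) = pvDiffPoly^[k] (taylorShift x p) := by
  induction k generalizing p with
  | zero => rfl
  | succ k ih =>
    rw [Function.iterate_succ_apply, Function.iterate_succ_apply, ih (pvDiffPoly p),
      taylor_diff_comm]

theorem taylorShift_getD0 (x : Int) (q : List Int) :
    (taylorShift x q).getD 0 0 = evalSpec q x := by
  cases q with
  | nil => rw [taylorShift_nil]; rfl
  | cons c t => rw [taylorShift_cons]; rfl

theorem iter_diff_getD0 (k : Nat) (l : List Int) :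
    (pvDiffPoly^[k] l).getD 0 0 = (k.factorial : Int) * l.getD k 0 := by
  induction k generalizing l with
  | zero => simp
  | succ k ih =>
    rw [Function.iterate_succ_apply, ih (pvDiffPoly l), diffPoly_getD, Nat.factorial_succ]
    push_cast
    ring

theorem deriv_val (x : Int) (p : List Int) (k : Nat) :
    evalSpec (pvDiffPoly^[k] p) x = (k.factorial : Int) * (taylorShift x p).getD k 0 := by
  rw [← taylorShift_getD0 x, taylor_iter_comm, iter_diff_getD0]

-- ---------- signs ----------

theorem sign_fact_mul (k : Nat) (b : Int) :
    Int.sign ((k.factorial : Int) * b) = Int.sign b := by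
  rw [Int.sign_mul]
  have h : (0 : Int) < (k.factorial : Int) := by exact_mod_cast k.factorial_pos
  rw [Int.sign_eq_one_iff_pos.mpr h, one_mul]

theorem seqVals_length (p : List Int) (x : Int) (n : Nat) : (seqVals p x n).length = n := by
  induction n generalizing p with
  | zero => rfl
  | succ n ih => simp [seqVals, ih]

theorem seqVals_getD (p : List Int) (x : Int) (n k : Nat) (h : k < n) :
    (seqVals p x n).getD k 0 = evalSpec (pvDiffPoly^[k] p) x := by
  induction n generalizing p k with
  | zero => omega
  | succ n ih =>
    cases k with
    | zero => rfl
    | succ k =>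
      have : (seqVals p x (n + 1)).getD (k + 1) 0 = (seqVals (pvDiffPoly p) x n).getD k 0 := rfl
      rw [this, ih (pvDiffPoly p) k (by omega), ← Function.iterate_succ_apply]

theorem sign_map_eq (x : Int) (p : List Int) :
    (seqVals p x p.length).map Int.sign = (taylorShift x p).map Int.sign := by
  apply List.ext_getElem
  · simp [seqVals_length, taylorShift_length]
  · intro i h1 h2
    have h1' : i < (seqVals p x p.length).length := by simpa using h1
    have hi : i < p.length := by simpa [seqVals_length] using h1'
    have hb : i < (taylorShift x p).length := by simpa using h2
    simp only [List.getElem_map]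
    rw [← List.getD_eq_getElem (seqVals p x p.length) 0 h1',
      ← List.getD_eq_getElem (taylorShift x p) 0 hb,
      seqVals_getD p x p.length i hi, deriv_val, sign_fact_mul]

-- ---------- counting sign changes ----------

def pvChanges (vals : List Int) : Int :=
  match vals with
  | [] => 0
  | v0 :: rest => (rest.foldl stepC (0, v0)).1

-- reference counter over the remaining values, given the sign of the last nonzero value
def chg (s : Int) : List Int → Int
  | [] => 0
  | v :: t => if v = 0 then chg s t else (if s ≠ Int.sign v then 1 else 0) + chg (Int.sign v) t

theorem mul_neg_iff_sign_ne (a b : Int) (ha : a ≠ 0) (hb : b ≠ 0) :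
    a * b < 0 ↔ Int.sign a ≠ Int.sign b := by
  rcases lt_or_gt_of_ne ha with h | h <;> rcases lt_or_gt_of_ne hb with h' | h'
  · rw [Int.sign_eq_neg_one_iff_neg.mpr h, Int.sign_eq_neg_one_iff_neg.mpr h']
    simp [not_lt.mpr (mul_pos_of_neg_of_neg h h').le]
  · rw [Int.sign_eq_neg_one_iff_neg.mpr h, Int.sign_eq_one_iff_pos.mpr h']
    simp [mul_neg_of_neg_of_pos h h']
  · rw [Int.sign_eq_one_iff_pos.mpr h, Int.sign_eq_neg_one_iff_neg.mpr h']
    simp [mul_neg_of_pos_of_neg h h']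
  · rw [Int.sign_eq_one_iff_pos.mpr h, Int.sign_eq_one_iff_pos.mpr h']
    simp [not_lt.mpr (mul_pos h h').le]

theorem foldl_stepC_chg (l : List Int) (cnt last : Int) (h : last ≠ 0) :
    (l.foldl stepC (cnt, last)).1 = cnt + chg (Int.sign last) l := by
  induction l generalizing cnt last with
  | nil => simp [chg]
  | cons v t ih =>
    by_cases hv : v = 0
    · subst hv
      have hs : stepC (cnt, last) 0 = (cnt, last) := by simp [stepC]
      rw [List.foldl_cons, hs, ih cnt last h]
      simp [chg]
    · have hs : stepC (cnt, last) v = (if last * v < 0 then cnt + 1 else cnt, v) := by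
        simp [stepC, hv]
      rw [List.foldl_cons, hs, ih _ v hv]
      have hiff := mul_neg_iff_sign_ne last v h hv
      by_cases hlt : last * v < 0
      · simp only [chg, hv, if_false, hiff.mp hlt, if_pos hlt, ite_not]
        ring
      · have hss : Int.sign last = Int.sign v := by
          by_contra hne; exact hlt (hiff.mpr hne)
        simp only [chg, hv, if_false, if_neg hlt, hss, ne_eq, not_true_eq_false]
        ring

theorem pvChanges_chg (v0 : Int) (rest : List Int) (h : v0 ≠ 0) :
    pvChanges (v0 :: rest) = chg (Int.sign v0) rest := by
  have := foldl_stepC_chg rest 0 v0 h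
  simpa [pvChanges] using this

def pd : List Int → Int
  | [] => 0
  | [_] => 0
  | a :: b :: t => (if a ≠ b then 1 else 0) + pd (b :: t)

theorem foldl_count_init (l : List (Int × Int)) (c : Int) :
    l.foldl (fun c ab => if ab.1 ≠ ab.2 then c + 1 else c) c
      = c + l.foldl (fun c ab => if ab.1 ≠ ab.2 then c + 1 else c) 0 := by
  induction l generalizing c with
  | nil => simp
  | cons a t ih =>
    rw [List.foldl_cons, List.foldl_cons, ih, ih (if a.1 ≠ a.2 then 0 + 1 else 0)]
    split_ifs <;> ring

theorem pvPairCount_eq_pd (l : List Int) : pvPairCount l = pd l := by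
  induction l using pd.induct with
  | case1 => rfl
  | case2 a => rfl
  | case3 a b t ih =>
    unfold pvPairCount at *
    rw [show (a :: b :: t).drop 1 = b :: t from rfl, List.zip_cons_cons, List.foldl_cons,
      foldl_count_init]
    rw [show (b :: t).drop 1 = t from rfl] at ih
    rw [ih]
    simp only [pd]
    split_ifs <;> ring

theorem sign_of_ne (v : Int) (h : v ≠ 0) : (if v > 0 then (1 : Int) else -1) = Int.sign v := by
  rcases lt_or_gt_of_ne h with hv | hv
  · rw [Int.sign_eq_neg_one_iff_neg.mpr hv]; simp [not_lt.mpr hv.le]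
  · rw [Int.sign_eq_one_iff_pos.mpr hv]; simp [hv]

theorem pvSignsList_eq (l : List Int) :
    pvSignsList l = (l.filter (fun v => v != 0)).map Int.sign := by
  unfold pvSignsList
  apply List.map_congr_left
  intro v hv
  have : v ≠ 0 := by simpa using (List.mem_filter.mp hv).2
  exact sign_of_ne v this

theorem pd_signs_chg (rest : List Int) (s : Int) :
    pd (s :: (rest.filter (fun v => v != 0)).map Int.sign) = chg s rest := by
  induction rest generalizing s with
  | nil => simp [pd, chg]
  | cons v t ih =>
    by_cases hv : v = 0
    · simp only [hv, chg]
      simpa [List.filter_cons] using ih s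
    · have hf : (v :: t).filter (fun v => v != 0) = v :: t.filter (fun v => v != 0) := by
        simp [hv]
      rw [hf, List.map_cons, pd, ih (Int.sign v)]
      simp [chg, hv]

theorem chg_congr (l1 : List Int) (l2 : List Int) (s : Int)
    (h : l1.map Int.sign = l2.map Int.sign) : chg s l1 = chg s l2 := by
  induction l1 generalizing l2 s with
  | nil =>
    cases l2 with
    | nil => rfl
    | cons w u => simp at h
  | cons v t ih =>
    cases l2 with
    | nil => simp at h
    | cons w u =>
      simp only [List.map_cons, List.cons.injEq] at h
      obtain ⟨hvw, htu⟩ := h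
      by_cases hv : v = 0
      · have hw : w = 0 := by
          have : Int.sign w = 0 := by rw [← hvw, hv, Int.sign_zero]
          exact Int.sign_eq_zero_iff_zero.mp this
        simp [chg, hv, hw, ih u s htu]
      · have hw : w ≠ 0 := by
          intro h0
          exact hv (Int.sign_eq_zero_iff_zero.mp (by rw [hvw, h0, Int.sign_zero]))
        simp only [chg, hv, hw, if_false, hvw, ih u (Int.sign w) htu]

-- ---------- per-point assembly ----------

theorem count_point (x : Int) (c : Int) (t : List Int)
    (hx : evalSpec (c :: t) x ≠ 0) :
    pvChanges (evalSpec (c :: t) x :: tailVals (c :: t) x t.length)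
      = pvPairCount (pvSignsList (taylorShift x (c :: t))) := by
  have hsm := sign_map_eq x (c :: t)
  rw [taylorShift_cons] at hsm ⊢
  have hseq : seqVals (c :: t) x (c :: t).length
      = evalSpec (c :: t) x :: tailVals (c :: t) x t.length := by
    rw [List.length_cons]
    show evalSpec (c :: t) x :: seqVals (pvDiffPoly (c :: t)) x t.length = _
    rw [seqVals_diffPoly]
  rw [hseq, List.map_cons, List.map_cons, List.cons.injEq] at hsm
  obtain ⟨_, htails⟩ := hsm
  rw [pvChanges_chg _ _ hx, pvSignsList_eq, pvPairCount_eq_pd]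
  have hf : ((evalSpec (c :: t) x :: taylorShift x (pvQuot x t)).filter (fun v => v != 0))
      = evalSpec (c :: t) x :: (taylorShift x (pvQuot x t)).filter (fun v => v != 0) := by
    simp [hx]
  rw [hf, List.map_cons, pd_signs_chg]
  exact chg_congr _ _ _ htails

theorem main_equiv (p : List Int) (sp ep : Int) :
    count_change_of_sign p sp ep = count_change_of_sign_alt p sp ep := by
  unfold count_change_of_sign count_change_of_sign_alt
  simp only [pvCalcValue_eq_evalSpec, taylorShift_getD0]
  by_cases h0 : evalSpec p sp * evalSpec p ep = 0
  · simp [h0]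
  · have hs : evalSpec p sp ≠ 0 := fun h => h0 (by rw [h, zero_mul])
    have he : evalSpec p ep ≠ 0 := fun h => h0 (by rw [h, mul_zero])
    cases p with
    | nil => exact absurd rfl hs
    | cons c t =>
      simp only [h0, ne_eq, not_false_eq_true, if_true, List.length_cons,
        Nat.add_sub_cancel, pvLoopBody_iterate, stepA_iterate]
      have h1 := count_point sp c t hs
      have h2 := count_point ep c t he
      simp only [pvChanges] at h1 h2
      rw [h1, h2]
      simp

-- ===== VERDICT (by name: the statement is the Claim_ definition above) =====
theorem count_change_of_sign_spec : Claim_equal_count_change_of_sign := by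
  intro p s e _
  unfold Spec_count_change_of_sign
  exact main_equiv p s e
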